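-- pv_equiv track=rewrite | github.com/otchaika/First_year_BMSTU_labs | lab_12/lab_12_1.py | find_w_len
-- ===== SOURCE A (Python) =====
-- def find_w_len(w):  # функция находит длину слова
--     chars = "',./\"#:;!?*(){}[]"
--     start_word = False
--     i = 0
--
--     while not start_word and i < len(w):
--         is_sign = False
--         for item in chars:
--             if w[i] == item:
--                 is_sign = True
--         if is_sign:
--             i += 1
--         else:
--             start_word = True
--
--     if i == len(w):
--         return 0
--     if is_num(w):
--         return 0
--     else:
--         lenn = 0
--         end_word = False
--         while not end_word:
--             lenn += 1
--             for item in chars: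
--                 if w[i] == item:
--                     lenn -= 1
--                     end_word = True
--             if i == len(w) - 1:
--                 end_word = True
--             i += 1
--         return lenn
--
-- def is_num(w):
--     nums = '1234567890.'
--     for item in str(w):
--         if item not in nums:
--             return False
--     if w == '.':
--         return False
--     return True
-- ===== SOURCE B (Python) =====
-- def find_w_len(w):  # one pass collecting ALL punctuation-separated run lengths, then take the first
--     chars = "',./\"#:;!?*(){}[]"
--     if is_num(w):
--         return 0
--     runs = []
--     cur = 0
--     for c in w:
--         if c in chars:
--             if cur:
--                 runs.append(cur)
--                 cur = 0
--         else:
--             cur += 1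
--     if cur:
--         runs.append(cur)
--     return runs[0] if runs else 0
--
-- def is_num(w):
--     return all(c in '1234567890.' for c in w) and w != '.'
-- ===== Notes on version B (the rewrite author's own statement) =====
-- stated objective: alternative
-- what changed: Instead of A's two staged flag-driven while loops (skip leading punctuation, then count the word prefix with +1/-1 bookkeeping and an is_sign inner 18-iteration scan per character), B makes a single left-to-right pass over the whole string with a (runs, cur) accumulator that collects the lengths of ALL punctuation-separated runs and returns the first collected length (0 if none); is_num becomes an all()-membership one-liner, and the per-character 18-way Python-level inner loop is replaced by C-level string membership tests.
import Mathlib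
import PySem

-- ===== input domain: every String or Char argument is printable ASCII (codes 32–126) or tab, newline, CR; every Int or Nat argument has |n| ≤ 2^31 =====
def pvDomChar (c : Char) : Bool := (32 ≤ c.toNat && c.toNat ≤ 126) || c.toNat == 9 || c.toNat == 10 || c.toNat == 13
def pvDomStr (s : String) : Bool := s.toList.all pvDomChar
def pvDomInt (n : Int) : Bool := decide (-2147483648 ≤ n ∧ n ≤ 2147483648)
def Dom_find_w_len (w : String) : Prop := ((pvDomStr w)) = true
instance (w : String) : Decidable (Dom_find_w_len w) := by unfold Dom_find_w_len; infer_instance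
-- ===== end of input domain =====

-- B replaces A's two staged flag-driven loops by one pass collecting all punctuation-separated
-- run lengths and returning the first (alternative decomposition; same cost).

-- ===== PORT A =====
def pvChars : List Char := "',./\"#:;!?*(){}[]".toList
def pvNums : List Char := "1234567890.".toList

-- inner `for item in chars: if w[i] == item: is_sign = True`
def pvIsSign (c : Char) : Bool :=
  pvChars.foldl (fun b item => if c = item then true else b) false

-- first while loop of A: skip leading punctuation, returning the final i
def pvSkipLoop (l : List Char) (i : Nat) : Nat :=
  if h : i < l.length then
    if pvIsSign (l.get ⟨i, h⟩) then pvSkipLoop l (i + 1) else i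
  else i
termination_by l.length - i

-- A's is_num: loop returning False on the first char not in nums
def pvIsNumLoop : List Char → Bool
  | [] => true
  | c :: rest => if pvNums.contains c then pvIsNumLoop rest else false

def pvIsNum (l : List Char) : Bool :=
  if pvIsNumLoop l then (if l = ['.'] then false else true) else false

-- second while loop of A (fuel ≥ l.length - i makes the in-range loop total; w[i] is in range on every reached iteration)
def pvCountLoop (l : List Char) : Nat → Nat → Nat → Nat
  | 0, _, lenn => lenn
  | fuel + 1, i, lenn =>
    let lenn := lenn + 1
    if pvIsSign (l.getD i ' ') then lenn - 1
    else if i = l.length - 1 then lenn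
    else pvCountLoop l fuel (i + 1) lenn

def find_w_len (w : String) : Int :=
  let l := w.toList
  let i := pvSkipLoop l 0
  if i = l.length then 0
  else if pvIsNum l then 0
  else ((pvCountLoop l (l.length - i) i 0 : Nat) : Int)

-- ===== PORT B =====
-- loop body of Source B: state (runs, cur)
def pvStep (st : List Nat × Nat) (c : Char) : List Nat × Nat :=
  if pvChars.contains c then (if st.2 ≠ 0 then (st.1 ++ [st.2], 0) else st)
  else (st.1, st.2 + 1)

def find_w_len_alt (w : String) : Int :=
  let l := w.toList
  if (l.all fun c => pvNums.contains c) ∧ l ≠ ['.'] then 0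
  else
    let st := l.foldl pvStep ([], 0)
    let runs := if st.2 ≠ 0 then st.1 ++ [st.2] else st.1
    match runs.head? with
    | some n => (n : Int)
    | none => 0

-- ===== PRECONDITION & SPEC =====
def Spec_find_w_len (w : String) (out : Int) : Prop := out = find_w_len_alt w
instance (w : String) (out : Int) : Decidable (Spec_find_w_len w out) := by unfold Spec_find_w_len; infer_instance

-- ===== CLAIM (what is proved, stated in full; the proofs are below) =====
def Claim_equal_find_w_len : Prop := ∀ (w : String), Dom_find_w_len w → Spec_find_w_len w (find_w_len w)

-- ===== LEMMAS AND PROOFS =====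

-- length of the leading non-punctuation run (proof-only yardstick both sides are reduced to)
def pvRun : List Char → Nat
  | [] => 0
  | c :: rest => if pvChars.contains c then 0 else pvRun rest + 1

-- functional description of Source B's loop: the run lengths of l, given a pending run of length cur
def pvRunsF : List Char → Nat → List Nat
  | [], cur => if cur ≠ 0 then [cur] else []
  | c :: rest, cur =>
    if pvChars.contains c then
      (if cur ≠ 0 then cur :: pvRunsF rest 0 else pvRunsF rest 0)
    else pvRunsF rest (cur + 1)

theorem pvIsSign_eq_contains (c : Char) : pvIsSign c = pvChars.contains c := by
  have gen : ∀ (l : List Char) (b : Bool),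
      l.foldl (fun b item => if c = item then true else b) b = (b || l.contains c) := by
    intro l
    induction l with
    | nil => simp
    | cons x xs ih =>
      intro b
      simp only [List.foldl_cons, ih, List.contains_cons]
      by_cases h : c = x
      · subst h; simp
      · have hx : (c == x) = false := beq_eq_false_iff_ne.mpr h
        simp [h, hx]
  simpa [pvIsSign] using gen pvChars false

theorem pvSkip_le (l : List Char) (i : Nat) (h : i ≤ l.length) : pvSkipLoop l i ≤ l.length := by
  fun_induction pvSkipLoop l i with
  | case1 i h1 h2 ih => exact ih (by omega)
  | case2 i h1 h2 => omega
  | case3 i h1 => omega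

theorem pvSkip_drop (l : List Char) (i : Nat) :
    l.drop (pvSkipLoop l i) = (l.drop i).dropWhile (fun c => pvChars.contains c) := by
  fun_induction pvSkipLoop l i with
  | case1 i h1 h2 ih =>
    rw [pvIsSign_eq_contains] at h2
    rw [List.drop_eq_getElem_cons h1, List.dropWhile_cons_of_pos (by simpa using h2)]
    exact ih
  | case2 i h1 h2 =>
    rw [pvIsSign_eq_contains] at h2
    rw [List.drop_eq_getElem_cons h1, List.dropWhile_cons_of_neg (by simpa using h2)]
  | case3 i h1 =>
    have : l.length ≤ i := by omega
    simp [List.drop_eq_nil_of_le this]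

theorem pvIsNumLoop_eq_all (l : List Char) :
    pvIsNumLoop l = l.all (fun c => pvNums.contains c) := by
  induction l with
  | nil => rfl
  | cons c rest ih =>
    simp only [pvIsNumLoop, List.all_cons]
    by_cases h : pvNums.contains c <;> simp [ih]

theorem pvCount_eq_run (l : List Char) (fuel i lenn : Nat)
    (hi : i < l.length) (hf : l.length - i ≤ fuel) :
    pvCountLoop l fuel i lenn = lenn + pvRun (l.drop i) := by
  induction fuel generalizing i lenn with
  | zero => omega
  | succ fuel ih =>
    have hg : l.getD i ' ' = l[i] := by
      simp [List.getD_eq_getElem?_getD, List.getElem?_eq_getElem hi]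
    rw [List.drop_eq_getElem_cons hi]
    simp only [pvCountLoop, pvRun, pvIsSign_eq_contains, hg]
    by_cases hs : pvChars.contains l[i]
    · rw [if_pos hs, if_pos hs]; omega
    · rw [if_neg hs, if_neg hs]
      by_cases hlast : i = l.length - 1
      · have h0 : l.drop (i + 1) = [] := List.drop_eq_nil_of_le (by omega)
        rw [if_pos hlast, h0]
        simp [pvRun]
      · rw [if_neg hlast, ih (i + 1) (lenn + 1) (by omega) (by omega)]
        omega

theorem pvIsNum_iff (l : List Char) :
    pvIsNum l = true ↔ ((l.all fun c => pvNums.contains c) = true ∧ l ≠ ['.']) := by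
  unfold pvIsNum
  rw [pvIsNumLoop_eq_all]
  by_cases h1 : (l.all fun c => pvNums.contains c) = true <;>
    by_cases h2 : l = ['.'] <;> simp [h2]

-- the fold of Source B, flushed, equals acc ++ pvRunsF l cur
theorem pvFold_eq_runsF (l : List Char) (acc : List Nat) (cur : Nat) :
    (let st := l.foldl pvStep (acc, cur)
     if st.2 ≠ 0 then st.1 ++ [st.2] else st.1) = acc ++ pvRunsF l cur := by
  induction l generalizing acc cur with
  | nil =>
    simp only [List.foldl_nil, pvRunsF]
    by_cases h : cur ≠ 0 <;> simp [h]
  | cons c rest ih =>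
    simp only [List.foldl_cons, pvRunsF, pvStep]
    by_cases hc : pvChars.contains c
    · rw [if_pos hc, if_pos hc]
      by_cases h0 : cur ≠ 0
      · rw [if_pos h0, if_pos h0, ih]
        simp
      · rw [if_neg h0, if_neg h0, ih]
        have : cur = 0 := by omega
        rw [this]
    · rw [if_neg hc, if_neg hc, ih]

theorem pvRunsF_head_pos (l : List Char) (cur : Nat) (h : cur ≠ 0) :
    (pvRunsF l cur).head? = some (cur + pvRun l) := by
  induction l generalizing cur with
  | nil => simp [pvRunsF, pvRun, h]
  | cons c rest ih =>
    simp only [pvRunsF, pvRun]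
    by_cases hc : pvChars.contains c
    · have hc' : c ∈ pvChars := by simpa using hc
      simp [hc', h]
    · rw [if_neg hc, if_neg hc, ih (cur + 1) (by omega)]
      congr 1
      omega

theorem pvRunsF_head_zero (l : List Char) :
    (pvRunsF l 0).head? =
      match l.dropWhile (fun c => pvChars.contains c) with
      | [] => none
      | l' => some (pvRun l') := by
  induction l with
  | nil => simp [pvRunsF]
  | cons c rest ih =>
    simp only [pvRunsF]
    by_cases hc : pvChars.contains c
    · rw [if_pos hc, if_neg (by simp)]
      rw [List.dropWhile_cons_of_pos (by simpa using hc)]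
      exact ih
    · have hc' : c ∉ pvChars := by simpa using hc
      rw [if_neg hc, pvRunsF_head_pos rest 1 one_ne_zero]
      rw [List.dropWhile_cons_of_neg (by simpa using hc)]
      simp [pvRun, hc', Nat.add_comm]

-- ===== VERDICT (by name: the statement is the Claim_ definition above) =====
theorem find_w_len_spec : Claim_equal_find_w_len := by
  intro w _
  show find_w_len w = find_w_len_alt w
  unfold find_w_len find_w_len_alt
  set l := w.toList with hl
  have hdrop : l.drop (pvSkipLoop l 0) = l.dropWhile (fun c => pvChars.contains c) := by
    simpa using pvSkip_drop l 0
  have hle : pvSkipLoop l 0 ≤ l.length := pvSkip_le l 0 (Nat.zero_le _)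
  have hB : (let st := l.foldl pvStep ([], 0)
      if st.2 ≠ 0 then st.1 ++ [st.2] else st.1) = pvRunsF l 0 := by
    simpa using pvFold_eq_runsF l [] 0
  by_cases hnum : (l.all fun c => pvNums.contains c) = true ∧ l ≠ ['.']
  · rw [if_pos hnum]
    by_cases hempty : pvSkipLoop l 0 = l.length
    · rw [if_pos hempty]
    · rw [if_neg hempty, if_pos ((pvIsNum_iff l).mpr hnum)]
  · rw [if_neg hnum]
    simp only [hB]
    by_cases hempty : pvSkipLoop l 0 = l.length
    · have hstr : l.dropWhile (fun c => pvChars.contains c) = [] := by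
        rw [← hdrop, hempty]; simp
      rw [if_pos hempty, pvRunsF_head_zero, hstr]
    · have hlt : pvSkipLoop l 0 < l.length := lt_of_le_of_ne hle hempty
      have hne : l.dropWhile (fun c => pvChars.contains c) ≠ [] := by
        rw [← hdrop]
        intro h
        have := List.drop_eq_nil_iff.mp h
        omega
      rw [if_neg hempty, if_neg (fun h => hnum ((pvIsNum_iff l).mp h)),
        pvCount_eq_run l _ _ 0 hlt (le_refl _), hdrop, Nat.zero_add, pvRunsF_head_zero]
      cases hd : l.dropWhile (fun c => pvChars.contains c) with
      | nil => exact absurd hd hne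
      | cons a as => rfl
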